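-- pv_equiv track=rewrite | github.com/flyingCloudRain/tradeview | backend/app/schemas/limit_up_board.py | extract_concept_names_from_keywords
-- ===== SOURCE A (Python) =====
-- from typing import Optional, List, Tuple
--
-- def extract_concept_names_from_keywords(keywords: Optional[str], existing_concepts: List[str]) -> List[str]:
--     """
--     从关键字中提取概念板块名称
--     通过匹配现有概念板块名称来提取
--     """
--     if not keywords or not keywords.strip():
--         return []
--
--     found_concepts = []
--     keywords_lower = keywords.lower()
--
--     # 遍历现有概念板块，检查是否在关键字中出现
--     for concept in existing_concepts:
--         if concept.lower() in keywords_lower: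
--             found_concepts.append(concept)
--
--     return found_concepts
-- ===== SOURCE B (Python) =====
-- def extract_concept_names_from_keywords(keywords, existing_concepts):
--     if not keywords or not keywords.strip():
--         return []
--     k = keywords.lower()
--     n = len(k)
--     # one scan of the keyword text per distinct concept length: collect every
--     # substring of those lengths into a hash set, then filter concepts by lookup
--     lengths = {len(c) for c in existing_concepts}
--     subs = set()
--     for L in lengths:
--         for i in range(n - L + 1):
--             subs.add(k[i:i + L])
--     return [c for c in existing_concepts if c.lower() in subs]
-- ===== Notes on version B (the rewrite author's own statement) =====
-- stated objective: faster
-- what changed: Instead of running one substring search over the keyword text per concept, B builds a hash set of all substrings of the keyword text whose lengths occur among the concepts (one scan per distinct length) and then filters concepts by a single set lookup each.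
import Mathlib
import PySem

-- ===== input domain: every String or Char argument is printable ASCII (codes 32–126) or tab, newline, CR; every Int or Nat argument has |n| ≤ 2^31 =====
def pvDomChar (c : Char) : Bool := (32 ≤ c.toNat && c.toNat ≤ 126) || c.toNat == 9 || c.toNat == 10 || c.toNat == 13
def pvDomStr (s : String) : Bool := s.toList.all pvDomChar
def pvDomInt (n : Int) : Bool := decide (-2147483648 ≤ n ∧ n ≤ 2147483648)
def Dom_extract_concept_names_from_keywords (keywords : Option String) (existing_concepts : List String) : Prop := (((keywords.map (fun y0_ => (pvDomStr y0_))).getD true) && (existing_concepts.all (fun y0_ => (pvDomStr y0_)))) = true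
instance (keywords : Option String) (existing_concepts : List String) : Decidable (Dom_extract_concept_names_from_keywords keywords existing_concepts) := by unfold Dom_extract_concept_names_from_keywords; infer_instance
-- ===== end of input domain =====

-- B replaces the per-concept substring scan by one hash set of the keyword text's
-- substrings of the occurring concept lengths, then filters concepts by set lookup.

-- ===== PORT A =====
def extract_concept_names_from_keywords (keywords : Option String) (existing_concepts : List String) : List String :=
  match keywords with
  | none => []
  | some kw =>
    if kw = "" ∨ PySem.Str.strip kw = "" then []
    else
      let keywords_lower := PySem.Str.lower kw
      existing_concepts.foldl
        (fun found_concepts concept =>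
          if PySem.Str.isIn (PySem.Str.lower concept) keywords_lower then found_concepts ++ [concept]
          else found_concepts) []

-- ===== PORT B =====
def extract_concept_names_from_keywords_alt (keywords : Option String) (existing_concepts : List String) : List String :=
  match keywords with
  | none => []
  | some kw =>
    if kw = "" ∨ PySem.Str.strip kw = "" then []
    else
      let k := PySem.Str.lower kw
      let n : Int := PySem.Str.len k
      let lengths : PySem.Set Int := PySem.Set.ofList (existing_concepts.map (fun c => PySem.Str.len c))
      let subs : PySem.Set String :=
        lengths.foldl
          (fun sb L =>
            (PySem.List.pyRange 0 (n - L + 1) 1).foldl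
              (fun sb i => PySem.Set.add sb (PySem.Str.slice k (some i) (some (i + L)))) sb)
          PySem.Set.empty
      existing_concepts.filter (fun c => PySem.Set.contains subs (PySem.Str.lower c))

-- ===== PRECONDITION & SPEC =====
def Spec_extract_concept_names_from_keywords (keywords : Option String) (existing_concepts : List String) (out : List String) : Prop := out = extract_concept_names_from_keywords_alt keywords existing_concepts
instance (keywords : Option String) (existing_concepts : List String) (out : List String) : Decidable (Spec_extract_concept_names_from_keywords keywords existing_concepts out) := by unfold Spec_extract_concept_names_from_keywords; infer_instance

-- ===== CLAIM (what is proved, stated in full; the proofs are below) =====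
def Claim_equal_extract_concept_names_from_keywords : Prop := ∀ (keywords : Option String) (existing_concepts : List String), Dom_extract_concept_names_from_keywords keywords existing_concepts → Spec_extract_concept_names_from_keywords keywords existing_concepts (extract_concept_names_from_keywords keywords existing_concepts)

-- ===== LEMMAS AND PROOFS =====

lemma charsSlice_eq (s : List Char) (a b : Option Int) :
    PySem.Chars.slice s a b = PySem.List.slice s a b := rfl

-- membership in a set built by a nested add-loop
lemma mem_foldl_add2 {α β γ : Type} [BEq γ] [LawfulBEq γ] (l : List α) (g : α → List β)
    (f : α → β → γ) (s0 : PySem.Set γ) (y : γ) :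
    y ∈ l.foldl (fun sb L => (g L).foldl (fun sb i => PySem.Set.add sb (f L i)) sb) s0 ↔
      y ∈ s0 ∨ ∃ L ∈ l, ∃ i ∈ g L, y = f L i := by
  induction l generalizing s0 with
  | nil => simp
  | cons L t ih => simp [ih, PySem.Set.mem_foldl_add, or_assoc]

lemma sub_mem_iff (k c : String) (ec : List String) (hc : c ∈ ec) :
    ((∃ L ∈ PySem.Set.ofList (ec.map (fun c => PySem.Str.len c)),
        ∃ i ∈ PySem.List.pyRange 0 (PySem.Str.len k - L + 1) 1,
          PySem.Str.lower c = PySem.Str.slice k (some i) (some (i + L)))) ↔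
      (PySem.Str.lower c).toList <:+: k.toList := by
  constructor
  · rintro ⟨L, hL, i, hi, hx⟩
    simp only [PySem.Set.mem_ofList, List.mem_map] at hL
    obtain ⟨c', -, rfl⟩ := hL
    simp only [PySem.List.mem_pyRange_one] at hi
    have h0i : (0:Int) ≤ i := hi.1
    have h0L : (0:Int) ≤ PySem.Str.len c' := by simp [PySem.Str.len_eq]
    have : (PySem.Str.lower c).toList =
        (k.toList.drop i.toNat).take ((i + PySem.Str.len c').toNat - i.toNat) := by
      rw [hx, PySem.Str.toList_slice, charsSlice_eq,
        PySem.List.slice_toNat _ h0i (by omega)]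
    rw [this]
    exact ((List.take_prefix _ _).isInfix).trans ((List.drop_suffix _ _).isInfix)
  · rintro ⟨pre, suf, h⟩
    have hlenx : (PySem.Str.lower c).toList.length = c.toList.length := by
      simp [PySem.Str.toList_lower, PySem.Chars.lower]
    have hlen : pre.length + ((PySem.Str.lower c).toList.length + suf.length) = k.toList.length := by
      have := congrArg List.length h
      simpa using this
    refine ⟨PySem.Str.len c, ?_, (pre.length : Int), ?_, ?_⟩
    · simp only [PySem.Set.mem_ofList, List.mem_map]
      exact ⟨c, hc, rfl⟩
    · simp only [PySem.List.mem_pyRange_one, PySem.Str.len_eq]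
      omega
    · have : (pre.length : Int) + PySem.Str.len c = ((pre.length + c.toList.length : Nat) : Int) := by
        simp [PySem.Str.len_eq]
      rw [this]
      apply String.toList_injective
      rw [PySem.Str.toList_slice, charsSlice_eq, PySem.List.slice_natCast, ← h]
      rw [List.append_assoc, List.drop_left,
        show pre.length + c.toList.length - pre.length = c.toList.length by omega,
        ← hlenx, List.take_left]

lemma contains_eq_isIn (k c : String) (ec : List String) (hc : c ∈ ec) :
    PySem.Set.contains
      ((PySem.Set.ofList (ec.map (fun c => PySem.Str.len c))).foldl
        (fun sb L =>
          (PySem.List.pyRange 0 (PySem.Str.len k - L + 1) 1).foldl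
            (fun sb i => PySem.Set.add sb (PySem.Str.slice k (some i) (some (i + L)))) sb)
        PySem.Set.empty)
      (PySem.Str.lower c)
      = PySem.Str.isIn (PySem.Str.lower c) k := by
  rw [Bool.eq_iff_iff, PySem.Set.contains_iff, mem_foldl_add2, PySem.Str.isIn_eq,
    PySem.Chars.isIn_iff_infix]
  rw [show ((PySem.Str.lower c) ∈ PySem.Set.empty) ↔ False by simp [PySem.Set.empty]]
  rw [← sub_mem_iff k c ec hc]
  tauto

-- ===== VERDICT (by name: the statement is the Claim_ definition above) =====
theorem extract_concept_names_from_keywords_spec : Claim_equal_extract_concept_names_from_keywords := by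
  intro keywords ec _
  unfold Spec_extract_concept_names_from_keywords
  unfold extract_concept_names_from_keywords extract_concept_names_from_keywords_alt
  cases keywords with
  | none => rfl
  | some kw =>
    simp only
    split
    · rfl
    · rw [PySem.List.foldl_append_if_eq_filter, List.nil_append]
      apply List.filter_congr
      intro c hc
      exact (contains_eq_isIn (PySem.Str.lower kw) c ec hc).symm
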